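-- pv_equiv track=rewrite | github.com/jmakateto/codewars-kata- | mysolutions.py | find_smallest_sorted_subarray
-- ===== SOURCE A (Python) =====
-- def find_smallest_sorted_subarray(arr):
--     n = len(arr)
--
--     # If all elements are the same, or array is already sorted, return [0, 0]
--     if all(x == arr[0] for x in arr) or arr == sorted(arr) or arr == sorted(arr, reverse=True):
--         return [0, 0]
--
--     # Find the left boundary of the unsorted subarray
--     m = 0
--     while m < n - 1 and arr[m] <= arr[m + 1]:
--         m += 1
--
--     # Find the right boundary of the unsorted subarray
--     n = len(arr) - 1
--     while n > 0 and arr[n] >= arr[n - 1]: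
--         n -= 1
--
--     # Find the min and max within the unsorted subarray
--     subarray_min = min(arr[m:n + 1])
--     subarray_max = max(arr[m:n + 1])
--
--     # Expand the left boundary if needed
--     while m > 0 and arr[m - 1] > subarray_min:
--         m -= 1
--
--     # Expand the right boundary if needed
--     while n < len(arr) - 1 and arr[n + 1] < subarray_max:
--         n += 1
--
--     return [m, n]
-- ===== SOURCE B (Python) =====
-- def find_smallest_sorted_subarray(arr):
--     n = len(arr)
--     # single linear pass for the trivial cases (nondecreasing or nonincreasing)
--     asc = True
--     desc = True
--     for i in range(n - 1):
--         if arr[i] > arr[i + 1]: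
--             asc = False
--         if arr[i] < arr[i + 1]:
--             desc = False
--     if asc or desc:
--         return [0, 0]
--     # right boundary: last index whose value is below the running prefix maximum
--     mx = arr[0]
--     r = 0
--     for i in range(1, n):
--         if arr[i] < mx:
--             r = i
--         else:
--             mx = arr[i]
--     # left boundary: first index whose value is above the running suffix minimum
--     mn = arr[n - 1]
--     l = n - 1
--     for i in reversed(range(n - 1)):
--         if arr[i] > mn:
--             l = i
--         else:
--             mn = arr[i]
--     return [l, r]
-- ===== Notes on version B (the rewrite author's own statement) =====
-- stated objective: faster
-- what changed: Replaces the two sorted() copies and the four boundary while-loops (with a min/max over a slice) by three linear passes: an adjacent-pair sortedness scan, a forward running-maximum scan giving the right boundary, and a backward running-minimum scan giving the left boundary.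
import Mathlib
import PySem

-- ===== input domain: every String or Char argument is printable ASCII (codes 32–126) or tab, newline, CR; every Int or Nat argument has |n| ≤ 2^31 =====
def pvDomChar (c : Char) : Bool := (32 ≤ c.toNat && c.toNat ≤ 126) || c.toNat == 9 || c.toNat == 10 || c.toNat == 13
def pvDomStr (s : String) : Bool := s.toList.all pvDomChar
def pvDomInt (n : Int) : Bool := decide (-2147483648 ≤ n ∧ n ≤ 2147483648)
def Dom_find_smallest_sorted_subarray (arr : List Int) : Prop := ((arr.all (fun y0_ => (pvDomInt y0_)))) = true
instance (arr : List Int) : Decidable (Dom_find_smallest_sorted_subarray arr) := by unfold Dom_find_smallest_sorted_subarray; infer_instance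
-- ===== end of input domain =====

-- B replaces A's sorted() comparisons and four boundary while-loops by three linear scans
-- (sortedness check, forward running max, backward running min): O(n) instead of O(n log n).

-- ===== PORT A =====
-- A's indices are always in range where evaluated, so arr[i] is ported as arr.getD i 0 with Nat counters.
-- Each while loop carries a fuel argument that only makes the recursion structural; the fuel
-- chosen at the call site provably never runs out before the loop condition goes false.
-- 'while m < n - 1 and arr[m] <= arr[m + 1]: m += 1'
def pvA_m (arr : List Int) (fuel m : Nat) : Nat :=
  match fuel with
  | 0 => m
  | fuel + 1 =>
    if m < arr.length - 1 ∧ arr.getD m 0 ≤ arr.getD (m + 1) 0 then pvA_m arr fuel (m + 1) else m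

-- 'while n > 0 and arr[n] >= arr[n - 1]: n -= 1'
def pvA_n (arr : List Int) (fuel t : Nat) : Nat :=
  match fuel with
  | 0 => t
  | fuel + 1 =>
    if 0 < t ∧ arr.getD (t - 1) 0 ≤ arr.getD t 0 then pvA_n arr fuel (t - 1) else t

-- 'while m > 0 and arr[m - 1] > subarray_min: m -= 1'
def pvA_expL (arr : List Int) (mn : Int) (fuel m : Nat) : Nat :=
  match fuel with
  | 0 => m
  | fuel + 1 =>
    if 0 < m ∧ mn < arr.getD (m - 1) 0 then pvA_expL arr mn fuel (m - 1) else m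

-- 'while n < len(arr) - 1 and arr[n + 1] < subarray_max: n += 1'
def pvA_expR (arr : List Int) (mx : Int) (fuel t : Nat) : Nat :=
  match fuel with
  | 0 => t
  | fuel + 1 =>
    if t < arr.length - 1 ∧ arr.getD (t + 1) 0 < mx then pvA_expR arr mx fuel (t + 1) else t

def find_smallest_sorted_subarray (arr : List Int) : List Int :=
  -- 'all(x == arr[0] for x in arr)': the generator is lazily empty on [], so arr[0] is never evaluated; headD is exact
  if arr.all (fun x => x == arr.headD 0)
      || arr == PySem.List.sorted arr (fun x => x) false
      || arr == PySem.List.sorted arr (fun x => x) true then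
    [0, 0]
  else
    let m0 := pvA_m arr (arr.length - 1) 0
    let n0 := pvA_n arr (arr.length - 1) (arr.length - 1)
    let sub := PySem.List.slice arr (some (m0 : Int)) (some ((n0 : Int) + 1))
    -- min/max of a nonempty slice: min?/max? are some here, getD 0 is never the default
    let mn := (PySem.List.min? sub (fun x => x)).getD 0
    let mx := (PySem.List.max? sub (fun x => x)).getD 0
    let m := pvA_expL arr mn m0 m0
    let t := pvA_expR arr mx (arr.length - 1 - n0) n0
    [(m : Int), (t : Int)]

-- ===== PORT B =====
def find_smallest_sorted_subarray_alt (arr : List Int) : List Int :=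
  let n : Int := arr.length
  -- 'for i in range(n-1): if arr[i] > arr[i+1]: asc = False; if arr[i] < arr[i+1]: desc = False'
  let ad := (PySem.List.pyRange 0 (n - 1) 1).foldl
      (fun p i =>
        ((if PySem.List.pyGetD arr (i + 1) 0 < PySem.List.pyGetD arr i 0 then false else p.1),
         (if PySem.List.pyGetD arr i 0 < PySem.List.pyGetD arr (i + 1) 0 then false else p.2)))
      (true, true)
  if ad.1 || ad.2 then [0, 0]
  else
    -- 'mx = arr[0]; r = 0; for i in range(1, n): if arr[i] < mx: r = i else: mx = arr[i]'
    let st2 := (PySem.List.pyRange 1 n 1).foldl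
        (fun p i => if PySem.List.pyGetD arr i 0 < p.1 then (p.1, i) else (PySem.List.pyGetD arr i 0, p.2))
        (PySem.List.pyGetD arr 0 0, 0)
    -- 'mn = arr[n-1]; l = n-1; for i in reversed(range(n-1)): if arr[i] > mn: l = i else: mn = arr[i]'
    let st3 := ((PySem.List.pyRange 0 (n - 1) 1).reverse).foldl
        (fun p i => if p.1 < PySem.List.pyGetD arr i 0 then (p.1, i) else (PySem.List.pyGetD arr i 0, p.2))
        (PySem.List.pyGetD arr (n - 1) 0, n - 1)
    [st3.2, st2.2]

-- ===== PRECONDITION & SPEC =====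
def Spec_find_smallest_sorted_subarray (arr : List Int) (out : List Int) : Prop := out = find_smallest_sorted_subarray_alt arr
instance (arr : List Int) (out : List Int) : Decidable (Spec_find_smallest_sorted_subarray arr out) := by unfold Spec_find_smallest_sorted_subarray; infer_instance

-- ===== CLAIM (what is proved, stated in full; the proofs are below) =====
def Claim_equal_find_smallest_sorted_subarray : Prop := ∀ (arr : List Int), Dom_find_smallest_sorted_subarray arr → Spec_find_smallest_sorted_subarray arr (find_smallest_sorted_subarray arr)

-- ===== LEMMAS AND PROOFS =====

-- 'index i has an inversion to its right/left'
def pvBadL (arr : List Int) (i : Nat) : Prop :=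
  ∃ j, i < j ∧ j < arr.length ∧ arr.getD j 0 < arr.getD i 0
def pvBadR (arr : List Int) (i : Nat) : Prop :=
  ∃ j, j < i ∧ arr.getD i 0 < arr.getD j 0

def pvCharL (arr : List Int) (l : Nat) : Prop :=
  pvBadL arr l ∧ ∀ i, i < l → ¬ pvBadL arr i
def pvCharR (arr : List Int) (r : Nat) : Prop :=
  pvBadR arr r ∧ r < arr.length ∧ ∀ i, r < i → i < arr.length → ¬ pvBadR arr i

def pvAsc (arr : List Int) : Prop := ∀ i : Nat, i + 1 < arr.length → arr.getD i 0 ≤ arr.getD (i + 1) 0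
def pvDesc (arr : List Int) : Prop := ∀ i : Nat, i + 1 < arr.length → arr.getD (i + 1) 0 ≤ arr.getD i 0

lemma pvCharL_unique (arr : List Int) (l1 l2 : Nat) (h1 : pvCharL arr l1) (h2 : pvCharL arr l2) : l1 = l2 := by
  rcases Nat.lt_trichotomy l1 l2 with h | h | h
  · exact absurd h1.1 (h2.2 _ h)
  · exact h
  · exact absurd h2.1 (h1.2 _ h)

lemma pvCharR_unique (arr : List Int) (r1 r2 : Nat) (h1 : pvCharR arr r1) (h2 : pvCharR arr r2) : r1 = r2 := by
  rcases Nat.lt_trichotomy r1 r2 with h | h | h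
  · exact absurd h2.1 (h1.2.2 _ h h2.2.1)
  · exact h
  · exact absurd h1.1 (h2.2.2 _ h h1.2.1)

-- a segment free of adjacent descents is monotone
lemma pvMono (arr : List Int) (lo hi : Nat)
    (h : ∀ k, lo ≤ k → k + 1 ≤ hi → arr.getD k 0 ≤ arr.getD (k + 1) 0) :
    ∀ i j, lo ≤ i → i ≤ j → j ≤ hi → arr.getD i 0 ≤ arr.getD j 0 := by
  intro i j hi1 hij hjhi
  induction j, hij using Nat.le_induction with
  | base => exact le_refl _
  | succ j hij ih => exact le_trans (ih (by omega)) (h j (by omega) (by omega))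

lemma pvMonoGe (arr : List Int) (lo hi : Nat)
    (h : ∀ k, lo ≤ k → k + 1 ≤ hi → arr.getD (k + 1) 0 ≤ arr.getD k 0) :
    ∀ i j, lo ≤ i → i ≤ j → j ≤ hi → arr.getD j 0 ≤ arr.getD i 0 := by
  intro i j hi1 hij hjhi
  induction j, hij using Nat.le_induction with
  | base => exact le_refl _
  | succ j hij ih => exact le_trans (h j (by omega) (by omega)) (ih (by omega))

lemma pairwise_le_iff (arr : List Int) : arr.Pairwise (· ≤ ·) ↔ pvAsc arr := by
  rw [List.pairwise_iff_getElem]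
  constructor
  · intro h i hi
    rw [List.getD_eq_getElem _ _ (by omega), List.getD_eq_getElem _ _ (by omega)]
    exact h i (i + 1) (by omega) (by omega) (by omega)
  · intro h i j hi hj hij
    rw [← List.getD_eq_getElem _ (0:Int) hi, ← List.getD_eq_getElem _ (0:Int) hj]
    exact pvMono arr 0 (arr.length - 1) (fun k _ hk => h k (by omega)) i j (by omega) (by omega) (by omega)

lemma pairwise_ge_iff (arr : List Int) : arr.Pairwise (fun a b => b ≤ a) ↔ pvDesc arr := by
  rw [List.pairwise_iff_getElem]
  constructor
  · intro h i hi
    rw [List.getD_eq_getElem _ _ (by omega), List.getD_eq_getElem _ _ (by omega)]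
    exact h i (i + 1) (by omega) (by omega) (by omega)
  · intro h i j hi hj hij
    rw [← List.getD_eq_getElem _ (0:Int) hi, ← List.getD_eq_getElem _ (0:Int) hj]
    exact pvMonoGe arr 0 (arr.length - 1) (fun k _ hk => h k (by omega)) i j (by omega) (by omega) (by omega)

lemma pvSliceMem (arr : List Int) (m k : Nat) (x : Int) :
    x ∈ (arr.drop m).take k ↔ ∃ i, m ≤ i ∧ i < m + k ∧ i < arr.length ∧ arr.getD i 0 = x := by
  constructor
  · intro hx
    obtain ⟨t, ht, hval⟩ := List.mem_iff_getElem.mp hx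
    have hlen : t < min k (arr.length - m) := by simpa using ht
    refine ⟨m + t, by omega, by omega, by omega, ?_⟩
    rw [List.getD_eq_getElem _ _ (by omega)]
    rw [← hval]
    rw [List.getElem_take, List.getElem_drop]
  · rintro ⟨i, h1, h2, h3, h4⟩
    apply List.mem_iff_getElem.mpr
    refine ⟨i - m, by simp; omega, ?_⟩
    rw [List.getElem_take, List.getElem_drop]
    rw [← h4, List.getD_eq_getElem _ _ (by omega)]
    congr 1
    omega

lemma pvA_m_spec (arr : List Int) (fuel m : Nat) (hf : arr.length - 1 ≤ fuel + m)
    (hsorted : ∀ k, k < m → arr.getD k 0 ≤ arr.getD (k + 1) 0)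
    (hex : ∃ d, m ≤ d ∧ d + 1 < arr.length ∧ arr.getD (d + 1) 0 < arr.getD d 0) :
    (∀ k, k < pvA_m arr fuel m → arr.getD k 0 ≤ arr.getD (k + 1) 0) ∧
      pvA_m arr fuel m + 1 < arr.length ∧
      arr.getD (pvA_m arr fuel m + 1) 0 < arr.getD (pvA_m arr fuel m) 0 := by
  induction fuel generalizing m with
  | zero =>
    obtain ⟨d, hd1, hd2, hd3⟩ := hex
    exact absurd hf (by omega)
  | succ fuel ih =>
    rw [pvA_m]
    split_ifs with hc
    · apply ih
      · omega
      · intro k hk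
        rcases Nat.lt_succ_iff_lt_or_eq.mp hk with h | h
        · exact hsorted k h
        · subst h; exact hc.2
      · obtain ⟨d, hd1, hd2, hd3⟩ := hex
        refine ⟨d, ?_, hd2, hd3⟩
        rcases Nat.eq_or_lt_of_le hd1 with rfl | h
        · exact absurd hc.2 (not_le.mpr hd3)
        · omega
    · obtain ⟨d, hd1, hd2, hd3⟩ := hex
      by_cases hlt : m < arr.length - 1
      · have hdesc : arr.getD (m + 1) 0 < arr.getD m 0 := by
          have h2 := fun h => hc ⟨hlt, h⟩
          omega
        exact ⟨hsorted, by omega, hdesc⟩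
      · omega

lemma pvA_n_spec (arr : List Int) (fuel t : Nat) (hf : t ≤ fuel) (ht : t ≤ arr.length - 1)
    (hsorted : ∀ k, t ≤ k → k + 1 ≤ arr.length - 1 → arr.getD k 0 ≤ arr.getD (k + 1) 0)
    (hex : ∃ d, 0 < d ∧ d ≤ t ∧ arr.getD d 0 < arr.getD (d - 1) 0) :
    0 < pvA_n arr fuel t ∧ pvA_n arr fuel t ≤ t ∧
      arr.getD (pvA_n arr fuel t) 0 < arr.getD (pvA_n arr fuel t - 1) 0 ∧
      ∀ k, pvA_n arr fuel t ≤ k → k + 1 ≤ arr.length - 1 → arr.getD k 0 ≤ arr.getD (k + 1) 0 := by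
  induction fuel generalizing t with
  | zero =>
    obtain ⟨d, hd1, hd2, hd3⟩ := hex
    exact absurd hf (by omega)
  | succ fuel ih =>
    rw [pvA_n]
    split_ifs with hc
    · obtain ⟨d, hd1, hd2, hd3⟩ := hex
      have hres := ih (t - 1) (by omega) (by omega)
        (fun k hk1 hk2 => by
          rcases Nat.eq_or_lt_of_le hk1 with heq | h
          · rw [← heq]
            have htt : t - 1 + 1 = t := by omega
            rw [htt]
            exact hc.2
          · exact hsorted k (by omega) hk2)
        ⟨d, hd1, by
          rcases Nat.eq_or_lt_of_le hd2 with rfl | h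
          · exact absurd hc.2 (not_le.mpr hd3)
          · omega, hd3⟩
      exact ⟨hres.1, by omega, hres.2.2⟩
    · obtain ⟨d, hd1, hd2, hd3⟩ := hex
      have ht0 : 0 < t := by omega
      have hdesc : arr.getD t 0 < arr.getD (t - 1) 0 := by
        have h2 := fun h => hc ⟨ht0, h⟩
        omega
      exact ⟨ht0, le_refl _, hdesc, hsorted⟩

lemma pvA_expL_spec (arr : List Int) (mn : Int) (fuel m : Nat) (hf : m ≤ fuel) :
    pvA_expL arr mn fuel m ≤ m ∧
      (pvA_expL arr mn fuel m = 0 ∨ arr.getD (pvA_expL arr mn fuel m - 1) 0 ≤ mn) ∧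
      (pvA_expL arr mn fuel m = m ∨ mn < arr.getD (pvA_expL arr mn fuel m) 0) := by
  induction fuel generalizing m with
  | zero =>
    have hm0 : m = 0 := by omega
    rw [pvA_expL]
    exact ⟨le_refl _, Or.inl hm0, Or.inl rfl⟩
  | succ fuel ih =>
    rw [pvA_expL]
    split_ifs with hc
    · have ihm := ih (m - 1) (by omega)
      refine ⟨by omega, ihm.2.1, ?_⟩
      rcases ihm.2.2 with h | h
      · rw [h]; right; simpa using hc.2
      · exact Or.inr h
    · refine ⟨le_refl _, ?_, Or.inl rfl⟩
      by_cases h0 : m = 0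
      · exact Or.inl h0
      · right
        have h2 := fun h => hc ⟨by omega, h⟩
        omega

lemma pvA_expR_spec (arr : List Int) (mx : Int) (fuel t : Nat)
    (hf : arr.length - 1 - t ≤ fuel) (ht : t ≤ arr.length - 1) :
    t ≤ pvA_expR arr mx fuel t ∧ pvA_expR arr mx fuel t ≤ arr.length - 1 ∧
      (pvA_expR arr mx fuel t = arr.length - 1 ∨ mx ≤ arr.getD (pvA_expR arr mx fuel t + 1) 0) ∧
      (pvA_expR arr mx fuel t = t ∨ arr.getD (pvA_expR arr mx fuel t) 0 < mx) := by
  induction fuel generalizing t with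
  | zero =>
    have htN : t = arr.length - 1 := by omega
    rw [pvA_expR]
    exact ⟨le_refl _, ht, Or.inl htN, Or.inl rfl⟩
  | succ fuel ih =>
    rw [pvA_expR]
    split_ifs with hc
    · have ih' := ih (t + 1) (by omega) (by omega)
      refine ⟨by omega, ih'.2.1, ih'.2.2.1, ?_⟩
      rcases ih'.2.2.2 with h | h
      · rw [h]; right; exact hc.2
      · exact Or.inr h
    · refine ⟨le_refl _, ht, ?_, Or.inl rfl⟩
      by_cases hlt : t < arr.length - 1
      · right
        have h2 := fun h => hc ⟨hlt, h⟩
        omega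
      · left; omega

-- A's guard is exactly "nondecreasing or nonincreasing"
lemma pvGuardA_iff (arr : List Int) :
    (arr.all (fun x => x == arr.headD 0)
      || arr == PySem.List.sorted arr (fun x => x) false
      || arr == PySem.List.sorted arr (fun x => x) true) = true ↔ pvAsc arr ∨ pvDesc arr := by
  simp only [Bool.or_eq_true, List.all_eq_true, beq_iff_eq]
  constructor
  · rintro ((h | h) | h)
    · left
      rw [← pairwise_le_iff]
      apply List.pairwise_of_forall_mem_list
      intro a ha b hb
      rw [h a ha, h b hb]
    · left
      rw [← pairwise_le_iff, h]
      exact PySem.List.sorted_pairwise arr (fun x => x)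
    · right
      rw [← pairwise_ge_iff, h]
      exact PySem.List.sorted_pairwise_rev arr (fun x => x)
  · rintro (h | h)
    · left; right
      exact (PySem.List.sorted_eq_self_of_pairwise arr (fun x => x) ((pairwise_le_iff arr).mpr h)).symm
    · right
      exact (PySem.List.sorted_rev_eq_self_of_pairwise arr (fun x => x) ((pairwise_ge_iff arr).mpr h)).symm

-- in the non-sorted case A's result satisfies the inversion characterisations
lemma pvA_main (arr : List Int) (hna : ¬ pvAsc arr) :
    pvCharL arr (pvA_expL arr
        ((PySem.List.min? (PySem.List.slice arr (some ((pvA_m arr (arr.length - 1) 0 : Nat) : Int)) (some (((pvA_n arr (arr.length - 1) (arr.length - 1) : Nat) : Int) + 1))) (fun x => x)).getD 0)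
        (pvA_m arr (arr.length - 1) 0) (pvA_m arr (arr.length - 1) 0)) ∧
    pvCharR arr (pvA_expR arr
        ((PySem.List.max? (PySem.List.slice arr (some ((pvA_m arr (arr.length - 1) 0 : Nat) : Int)) (some (((pvA_n arr (arr.length - 1) (arr.length - 1) : Nat) : Int) + 1))) (fun x => x)).getD 0)
        (arr.length - 1 - pvA_n arr (arr.length - 1) (arr.length - 1))
        (pvA_n arr (arr.length - 1) (arr.length - 1))) := by
  obtain ⟨d, hd1, hd2⟩ : ∃ d : Nat, d + 1 < arr.length ∧ arr.getD (d + 1) 0 < arr.getD d 0 := by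
    unfold pvAsc at hna
    push Not at hna
    obtain ⟨i, h1, h2⟩ := hna
    exact ⟨i, h1, h2⟩
  obtain ⟨hpre, hm0lt, hm0desc⟩ :=
    pvA_m_spec arr (arr.length - 1) 0 (by omega) (by omega) ⟨d, by omega, hd1, hd2⟩
  obtain ⟨hn0pos, hn0le, hn0desc, hsuf⟩ :=
    pvA_n_spec arr (arr.length - 1) (arr.length - 1) (le_refl _) (le_refl _)
      (fun k hk1 hk2 => by omega) ⟨d + 1, by omega, by omega, by simpa using hd2⟩
  set m0 := pvA_m arr (arr.length - 1) 0 with hm0e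
  set n0 := pvA_n arr (arr.length - 1) (arr.length - 1) with hn0e
  have hmn01 : m0 + 1 ≤ n0 := by
    by_contra hcon
    have := hsuf m0 (by omega) (by omega)
    omega
  have hcast : PySem.List.slice arr (some ((m0 : Nat) : Int)) (some (((n0 : Nat) : Int) + 1))
      = (arr.drop m0).take (n0 + 1 - m0) := by
    rw [show ((n0 : Nat) : Int) + 1 = ((n0 + 1 : Nat) : Int) by push_cast; ring,
      PySem.List.slice_natCast]
  have hsubne : (arr.drop m0).take (n0 + 1 - m0) ≠ [] := by
    intro h
    have hlen := congrArg List.length h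
    simp at hlen
    omega
  obtain ⟨mnv, hmne⟩ : ∃ v, PySem.List.min? ((arr.drop m0).take (n0 + 1 - m0)) (fun x => x) = some v := by
    cases h : PySem.List.min? ((arr.drop m0).take (n0 + 1 - m0)) (fun x => x) with
    | none =>
      rw [PySem.List.min?_eq_none_iff] at h
      exact absurd h hsubne
    | some v => exact ⟨v, rfl⟩
  obtain ⟨mxv, hmxe⟩ : ∃ v, PySem.List.max? ((arr.drop m0).take (n0 + 1 - m0)) (fun x => x) = some v := by
    cases h : PySem.List.max? ((arr.drop m0).take (n0 + 1 - m0)) (fun x => x) with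
    | none =>
      rw [PySem.List.max?_eq_none_iff] at h
      exact absurd h hsubne
    | some v => exact ⟨v, rfl⟩
  obtain ⟨p, hp1, hp2, hp3, hp4⟩ := (pvSliceMem arr m0 (n0 + 1 - m0) mnv).mp (PySem.List.min?_mem hmne)
  obtain ⟨q, hq1, hq2, hq3, hq4⟩ := (pvSliceMem arr m0 (n0 + 1 - m0) mxv).mp (PySem.List.max?_mem hmxe)
  have hwin_mn : ∀ i, m0 ≤ i → i ≤ n0 → mnv ≤ arr.getD i 0 := fun i h1 h2 =>
    PySem.List.min?_isMin hmne _ ((pvSliceMem arr m0 (n0 + 1 - m0) _).mpr ⟨i, h1, by omega, by omega, rfl⟩)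
  have hwin_mx : ∀ i, m0 ≤ i → i ≤ n0 → arr.getD i 0 ≤ mxv := fun i h1 h2 =>
    PySem.List.max?_isMax hmxe _ ((pvSliceMem arr m0 (n0 + 1 - m0) _).mpr ⟨i, h1, by omega, by omega, rfl⟩)
  rw [hcast, hmne, hmxe]
  simp only [Option.getD_some]
  have hmono_pre := pvMono arr 0 m0 (fun k _ hk => hpre k (by omega))
  have hmono_suf := pvMono arr n0 (arr.length - 1) hsuf
  obtain ⟨hl1, hl2, hl3⟩ := pvA_expL_spec arr mnv m0 m0 (le_refl _)
  obtain ⟨hr1, hr2, hr3, hr4⟩ := pvA_expR_spec arr mxv (arr.length - 1 - n0) n0 (le_refl _) (by omega)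
  set l := pvA_expL arr mnv m0 m0 with hle
  set r := pvA_expR arr mxv (arr.length - 1 - n0) n0 with hre
  have hmnm0 : mnv < arr.getD m0 0 := lt_of_le_of_lt (hwin_mn (m0 + 1) (by omega) (by omega)) hm0desc
  have hmnl : mnv < arr.getD l 0 := by
    rcases hl3 with h | h
    · rw [h]; exact hmnm0
    · exact h
  have hmxn0 : arr.getD n0 0 < mxv := lt_of_lt_of_le hn0desc (hwin_mx (n0 - 1) (by omega) (by omega))
  have hmxr : arr.getD r 0 < mxv := by
    rcases hr4 with h | h
    · rw [h]; exact hmxn0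
    · exact h
  constructor
  · constructor
    · -- pvBadL l
      refine ⟨p, ?_, hp3, ?_⟩
      · rcases Nat.lt_or_ge l p with h | h
        · exact h
        · have hpl : p = l := by omega
          rw [hpl] at hp4
          omega
      · rw [hp4]; exact hmnl
    · intro i hi hbad
      obtain ⟨j, hij, hjN, hji⟩ := hbad
      have hl0 : 0 < l := by omega
      have hlm : arr.getD (l - 1) 0 ≤ mnv := by
        rcases hl2 with h | h
        · omega
        · exact h
      have hai : arr.getD i 0 ≤ mnv :=
        le_trans (hmono_pre i (l - 1) (by omega) (by omega) (by omega)) hlm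
      have haj : arr.getD i 0 ≤ arr.getD j 0 := by
        by_cases hc : j ≤ m0
        · exact hmono_pre i j (by omega) (by omega) (by omega)
        · by_cases hc2 : j ≤ n0
          · exact le_trans hai (hwin_mn j (by omega) (by omega))
          · exact le_trans (le_trans hai (hwin_mn n0 (by omega) (by omega)))
              (hmono_suf n0 j (le_refl _) (by omega) (by omega))
      omega
  · refine ⟨⟨q, ?_, ?_⟩, by omega, ?_⟩
    · rcases Nat.lt_or_ge q r with h | h
      · exact h
      · have hqr : q = r := by omega
        rw [hqr] at hq4
        omega
    · rw [hq4]; exact hmxr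
    · intro i hri hiN hbad
      obtain ⟨j, hji, hja⟩ := hbad
      have hrlt : r < arr.length - 1 := by omega
      have hmxr1 : mxv ≤ arr.getD (r + 1) 0 := by
        rcases hr3 with h | h
        · omega
        · exact h
      have hai : mxv ≤ arr.getD i 0 :=
        le_trans hmxr1 (hmono_suf (r + 1) i (by omega) (by omega) (by omega))
      have haj : arr.getD j 0 ≤ arr.getD i 0 := by
        by_cases hc : j ≤ m0
        · exact le_trans (hmono_pre j m0 (by omega) hc (by omega))
            (le_trans (hwin_mx m0 (le_refl _) (by omega)) hai)
        · by_cases hc2 : j ≤ n0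
          · exact le_trans (hwin_mx j (by omega) hc2) hai
          · exact hmono_suf j i (by omega) (by omega) (by omega)
      omega

lemma pvFoldFalse {α : Type} (l : List α) (P : α → Prop) [DecidablePred P] :
    ∀ b : Bool, (l.foldl (fun ok x => if P x then false else ok) b) = (b && !(l.any (fun x => decide (P x)))) := by
  induction l with
  | nil => intro b; simp
  | cons x t ih =>
    intro b
    simp only [List.foldl_cons, List.any_cons, ih]
    by_cases h : P x <;> simp [h]

-- B's sortedness scan computes exactly (pvAsc, pvDesc)
lemma pvB_guard (arr : List Int) :
    ((PySem.List.pyRange 0 ((arr.length : Int) - 1) 1).foldl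
      (fun p i =>
        ((if PySem.List.pyGetD arr (i + 1) 0 < PySem.List.pyGetD arr i 0 then false else p.1),
         (if PySem.List.pyGetD arr i 0 < PySem.List.pyGetD arr (i + 1) 0 then false else p.2)))
      (true, true)).1 = true ↔ pvAsc arr := by
  rw [PySem.List.foldl_prod_mk
    (f := fun ok i => if PySem.List.pyGetD arr (i + 1) 0 < PySem.List.pyGetD arr i 0 then false else ok)
    (g := fun ok i => if PySem.List.pyGetD arr i 0 < PySem.List.pyGetD arr (i + 1) 0 then false else ok)]
  simp only [pvFoldFalse, Bool.true_and, Bool.not_eq_eq_eq_not, Bool.not_true, List.any_eq_false]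
  constructor
  · intro h k hk
    have := h (k : Int) (by rw [PySem.List.mem_pyRange_one]; omega)
    rw [show ((k : Int) + 1) = ((k + 1 : Nat) : Int) by push_cast; ring] at this
    simp only [PySem.List.pyGetD_natCast, decide_eq_true_eq, not_lt] at this
    exact this
  · intro h i hi
    rw [PySem.List.mem_pyRange_one] at hi
    obtain ⟨h0, h1⟩ := hi
    have hk : i = ((i.toNat : Nat) : Int) := by omega
    rw [hk, show ((i.toNat : Nat) : Int) + 1 = ((i.toNat + 1 : Nat) : Int) by push_cast; ring]
    simp only [PySem.List.pyGetD_natCast, decide_eq_true_eq, not_lt]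
    have := h i.toNat (by omega)
    omega

lemma pvB_guard2 (arr : List Int) :
    ((PySem.List.pyRange 0 ((arr.length : Int) - 1) 1).foldl
      (fun p i =>
        ((if PySem.List.pyGetD arr (i + 1) 0 < PySem.List.pyGetD arr i 0 then false else p.1),
         (if PySem.List.pyGetD arr i 0 < PySem.List.pyGetD arr (i + 1) 0 then false else p.2)))
      (true, true)).2 = true ↔ pvDesc arr := by
  rw [PySem.List.foldl_prod_mk
    (f := fun ok i => if PySem.List.pyGetD arr (i + 1) 0 < PySem.List.pyGetD arr i 0 then false else ok)
    (g := fun ok i => if PySem.List.pyGetD arr i 0 < PySem.List.pyGetD arr (i + 1) 0 then false else ok)]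
  simp only [pvFoldFalse, Bool.true_and, Bool.not_eq_eq_eq_not, Bool.not_true, List.any_eq_false]
  constructor
  · intro h k hk
    have := h (k : Int) (by rw [PySem.List.mem_pyRange_one]; omega)
    rw [show ((k : Int) + 1) = ((k + 1 : Nat) : Int) by push_cast; ring] at this
    simp only [PySem.List.pyGetD_natCast, decide_eq_true_eq, not_lt] at this
    exact this
  · intro h i hi
    rw [PySem.List.mem_pyRange_one] at hi
    obtain ⟨h0, h1⟩ := hi
    have hk : i = ((i.toNat : Nat) : Int) := by omega
    rw [hk, show ((i.toNat : Nat) : Int) + 1 = ((i.toNat + 1 : Nat) : Int) by push_cast; ring]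
    simp only [PySem.List.pyGetD_natCast, decide_eq_true_eq, not_lt]
    have := h i.toNat (by omega)
    omega

-- B's forward running-max scan: the second component satisfies pvCharR (when an inversion exists)
lemma pvB_loop2 (arr : List Int) (hna : ¬ pvAsc arr) :
    ∃ r : Nat, ((PySem.List.pyRange 1 (arr.length : Int) 1).foldl
        (fun p i => if PySem.List.pyGetD arr i 0 < p.1 then (p.1, i) else (PySem.List.pyGetD arr i 0, p.2))
        (PySem.List.pyGetD arr 0 0, 0)).2 = (r : Int) ∧ pvCharR arr r := by
  obtain ⟨d, hd1, hd2⟩ : ∃ d : Nat, d + 1 < arr.length ∧ arr.getD (d + 1) 0 < arr.getD d 0 := by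
    unfold pvAsc at hna
    push Not at hna
    obtain ⟨i, h1, h2⟩ := hna
    exact ⟨i, h1, h2⟩
  have main : ∀ k : Nat, 1 ≤ k → k ≤ arr.length →
      ∃ (mxv : Int) (r : Nat),
        (PySem.List.pyRange 1 (k : Int) 1).foldl
          (fun p i => if PySem.List.pyGetD arr i 0 < p.1 then (p.1, i) else (PySem.List.pyGetD arr i 0, p.2))
          (PySem.List.pyGetD arr 0 0, 0) = (mxv, (r : Int)) ∧
        (∀ i, i < k → arr.getD i 0 ≤ mxv) ∧ (∃ i, i < k ∧ arr.getD i 0 = mxv) ∧ r < k ∧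
        ((r = 0 ∧ ∀ i, i < k → ¬ pvBadR arr i) ∨
          (pvBadR arr r ∧ ∀ i, r < i → i < k → ¬ pvBadR arr i)) := by
    intro k hk1
    induction k, hk1 using Nat.le_induction with
    | base =>
      intro _
      refine ⟨arr.getD 0 0, 0, ?_, ?_, ⟨0, by omega, rfl⟩, by omega, Or.inl ⟨rfl, ?_⟩⟩
      · rw [PySem.List.pyRange_one_eq_nil (by omega)]
        simp [PySem.List.pyGetD_zero]
      · intro i hi
        have hi0 : i = 0 := by omega
        subst hi0
        exact le_refl _
      · intro i hi hb
        obtain ⟨j, hj, _⟩ := hb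
        omega
    | succ k hk ih =>
      intro hkN
      obtain ⟨mxv, r, hfold, hmax, hatt, hrk, hbr⟩ := ih (by omega)
      rw [show ((k + 1 : Nat) : Int) = (k : Int) + 1 by push_cast; ring,
        PySem.List.pyRange_one_succ_right (by omega), List.foldl_append, hfold]
      simp only [List.foldl_cons, List.foldl_nil, PySem.List.pyGetD_natCast]
      by_cases hc : arr.getD k 0 < mxv
      · rw [if_pos hc]
        obtain ⟨w, hw1, hw2⟩ := hatt
        refine ⟨mxv, k, rfl, ?_, ⟨w, by omega, hw2⟩, by omega, Or.inr ⟨⟨w, hw1, by omega⟩, ?_⟩⟩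
        · intro i hi
          by_cases hik : i < k
          · exact hmax i hik
          · have : i = k := by omega
            subst this
            exact le_of_lt hc
        · intro i h1 h2
          omega
      · rw [if_neg hc]
        have hnbk : ¬ pvBadR arr k := by
          intro hb
          obtain ⟨j, hj1, hj2⟩ := hb
          have := hmax j hj1
          omega
        have hstep : ∀ i, i < k + 1 → arr.getD i 0 ≤ arr.getD k 0 := by
          intro i hi
          by_cases hik : i < k
          · exact le_trans (hmax i hik) (not_lt.mp hc)
          · have : i = k := by omega
            subst this
            exact le_refl _
        refine ⟨arr.getD k 0, r, rfl, hstep, ⟨k, by omega, rfl⟩, by omega, ?_⟩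
        rcases hbr with ⟨hr0, hall⟩ | ⟨hb, hmaxi⟩
        · refine Or.inl ⟨hr0, ?_⟩
          intro i hi
          by_cases hik : i < k
          · exact hall i hik
          · have : i = k := by omega
            subst this
            exact hnbk
        · refine Or.inr ⟨hb, ?_⟩
          intro i h1 h2
          by_cases hik : i < k
          · exact hmaxi i h1 hik
          · have : i = k := by omega
            subst this
            exact hnbk
  obtain ⟨mxv, r, hfold, hmax, hatt, hrk, hbr⟩ := main arr.length (by omega) (le_refl _)
  refine ⟨r, by rw [hfold], ?_⟩
  rcases hbr with ⟨_, hall⟩ | ⟨hb, hmaxi⟩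
  · exact absurd ⟨d, by omega, hd2⟩ (hall (d + 1) hd1)
  · exact ⟨hb, by omega, hmaxi⟩

-- B's backward running-min scan: the second component satisfies pvCharL (when an inversion exists)
lemma pvB_loop3 (arr : List Int) (hna : ¬ pvAsc arr) :
    ∃ l : Nat, (((PySem.List.pyRange 0 ((arr.length : Int) - 1) 1).reverse).foldl
        (fun p i => if p.1 < PySem.List.pyGetD arr i 0 then (p.1, i) else (PySem.List.pyGetD arr i 0, p.2))
        (PySem.List.pyGetD arr ((arr.length : Int) - 1) 0, (arr.length : Int) - 1)).2 = (l : Int) ∧ pvCharL arr l := by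
  obtain ⟨d, hd1, hd2⟩ : ∃ d : Nat, d + 1 < arr.length ∧ arr.getD (d + 1) 0 < arr.getD d 0 := by
    unfold pvAsc at hna
    push Not at hna
    obtain ⟨i, h1, h2⟩ := hna
    exact ⟨i, h1, h2⟩
  have hN2 : 2 ≤ arr.length := by omega
  have hcast1 : ((arr.length : Int) - 1) = ((arr.length - 1 : Nat) : Int) := by omega
  have main : ∀ j : Nat, j ≤ arr.length - 1 →
      ∃ (mnv : Int) (l : Nat),
        ((PySem.List.pyRange ((arr.length - 1 - j : Nat) : Int) ((arr.length : Int) - 1) 1).reverse).foldl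
          (fun p i => if p.1 < PySem.List.pyGetD arr i 0 then (p.1, i) else (PySem.List.pyGetD arr i 0, p.2))
          (PySem.List.pyGetD arr ((arr.length : Int) - 1) 0, (arr.length : Int) - 1) = (mnv, (l : Int)) ∧
        (∀ i, arr.length - 1 - j ≤ i → i < arr.length → mnv ≤ arr.getD i 0) ∧
        (∃ i, arr.length - 1 - j ≤ i ∧ i < arr.length ∧ arr.getD i 0 = mnv) ∧
        l ≤ arr.length - 1 ∧
        ((l = arr.length - 1 ∧ ∀ i, arr.length - 1 - j ≤ i → ¬ pvBadL arr i) ∨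
          (pvBadL arr l ∧ arr.length - 1 - j ≤ l ∧
            ∀ i, arr.length - 1 - j ≤ i → i < l → ¬ pvBadL arr i)) := by
    intro j hj
    induction j with
    | zero =>
      refine ⟨arr.getD (arr.length - 1) 0, arr.length - 1, ?_, ?_, ⟨arr.length - 1, by omega, by omega, rfl⟩, le_refl _, Or.inl ⟨rfl, ?_⟩⟩
      · rw [PySem.List.pyRange_one_eq_nil (by omega)]
        simp only [List.reverse_nil, List.foldl_nil, hcast1, PySem.List.pyGetD_natCast]
      · intro i h1 h2
        have : i = arr.length - 1 := by omega
        subst this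
        exact le_refl _
      · intro i hi hb
        obtain ⟨j', hj1, hj2, _⟩ := hb
        omega
    | succ j ih =>
      obtain ⟨mnv, l, hfold, hmin, hatt, hlN, hbr⟩ := ih (by omega)
      have ht : arr.length - 1 - j = (arr.length - 1 - (j + 1)) + 1 := by omega
      rw [ht] at hfold hmin hatt hbr
      set t := arr.length - 1 - (j + 1) with hte
      have hsplit : PySem.List.pyRange ((t : Nat) : Int) ((arr.length : Int) - 1) 1
          = ((t : Nat) : Int) :: PySem.List.pyRange (((t + 1 : Nat) : Nat) : Int) ((arr.length : Int) - 1) 1 := by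
        have h1 : (((t + 1 : Nat)) : Int) = ((t : Nat) : Int) + 1 := by push_cast; ring
        rw [h1, PySem.List.pyRange_one_cons (by omega)]
      rw [hsplit, List.reverse_cons, List.foldl_append, hfold]
      simp only [List.foldl_cons, List.foldl_nil, PySem.List.pyGetD_natCast]
      by_cases hc : mnv < arr.getD t 0
      · rw [if_pos hc]
        obtain ⟨w, hw1, hw2, hw3⟩ := hatt
        refine ⟨mnv, t, rfl, ?_, ⟨w, by omega, hw2, hw3⟩, by omega,
          Or.inr ⟨⟨w, by omega, hw2, by omega⟩, le_refl _, ?_⟩⟩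
        · intro i h1 h2
          by_cases hit : t + 1 ≤ i
          · exact hmin i hit h2
          · have : i = t := by omega
            subst this
            exact le_of_lt hc
        · intro i h1 h2
          omega
      · rw [if_neg hc]
        have hnbt : ¬ pvBadL arr t := by
          intro hb
          obtain ⟨j', hj1, hj2, hj3⟩ := hb
          have := hmin j' (by omega) hj2
          omega
        have hstep : ∀ i, t ≤ i → i < arr.length → arr.getD t 0 ≤ arr.getD i 0 := by
          intro i h1 h2
          by_cases hit : t + 1 ≤ i
          · exact le_trans (not_lt.mp hc) (hmin i hit h2)
          · have : i = t := by omega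
            subst this
            exact le_refl _
        refine ⟨arr.getD t 0, l, rfl, hstep, ⟨t, le_refl _, by omega, rfl⟩, hlN, ?_⟩
        rcases hbr with ⟨hl0, hall⟩ | ⟨hb, hbl, hmini⟩
        · refine Or.inl ⟨hl0, ?_⟩
          intro i hi
          by_cases hit : t + 1 ≤ i
          · exact hall i hit
          · have : i = t := by omega
            subst this
            exact hnbt
        · refine Or.inr ⟨hb, by omega, ?_⟩
          intro i h1 h2
          by_cases hit : t + 1 ≤ i
          · exact hmini i hit h2
          · have : i = t := by omega
            subst this
            exact hnbt
  obtain ⟨mnv, l, hfold, hmin, hatt, hlN, hbr⟩ := main (arr.length - 1) (le_refl _)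
  have h0 : arr.length - 1 - (arr.length - 1) = 0 := by omega
  rw [h0] at hfold hmin hatt hbr
  simp only [Nat.cast_zero] at hfold
  refine ⟨l, by rw [hfold], ?_⟩
  rcases hbr with ⟨_, hall⟩ | ⟨hb, _, hmini⟩
  · exact absurd ⟨d + 1, by omega, hd1, hd2⟩ (hall d (by omega))
  · exact ⟨hb, fun i hi => hmini i (by omega) hi⟩

-- ===== VERDICT (by name: the statement is the Claim_ definition above) =====
theorem find_smallest_sorted_subarray_spec : Claim_equal_find_smallest_sorted_subarray := by
  intro arr _
  unfold Spec_find_smallest_sorted_subarray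
  unfold find_smallest_sorted_subarray find_smallest_sorted_subarray_alt
  dsimp only
  by_cases hg : pvAsc arr ∨ pvDesc arr
  · rw [if_pos ((pvGuardA_iff arr).mpr hg)]
    have hcond : (((PySem.List.pyRange 0 ((arr.length : Int) - 1) 1).foldl
        (fun p i =>
          ((if PySem.List.pyGetD arr (i + 1) 0 < PySem.List.pyGetD arr i 0 then false else p.1),
           (if PySem.List.pyGetD arr i 0 < PySem.List.pyGetD arr (i + 1) 0 then false else p.2)))
        (true, true)).1
      || ((PySem.List.pyRange 0 ((arr.length : Int) - 1) 1).foldl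
        (fun p i =>
          ((if PySem.List.pyGetD arr (i + 1) 0 < PySem.List.pyGetD arr i 0 then false else p.1),
           (if PySem.List.pyGetD arr i 0 < PySem.List.pyGetD arr (i + 1) 0 then false else p.2)))
        (true, true)).2) = true := by
      rw [Bool.or_eq_true]
      rcases hg with h | h
      · exact Or.inl ((pvB_guard arr).mpr h)
      · exact Or.inr ((pvB_guard2 arr).mpr h)
    rw [if_pos hcond]
  · rw [if_neg (fun h => hg ((pvGuardA_iff arr).mp h))]
    have hna : ¬ pvAsc arr := fun h => hg (Or.inl h)
    have hcond : ¬ ((((PySem.List.pyRange 0 ((arr.length : Int) - 1) 1).foldl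
        (fun p i =>
          ((if PySem.List.pyGetD arr (i + 1) 0 < PySem.List.pyGetD arr i 0 then false else p.1),
           (if PySem.List.pyGetD arr i 0 < PySem.List.pyGetD arr (i + 1) 0 then false else p.2)))
        (true, true)).1
      || ((PySem.List.pyRange 0 ((arr.length : Int) - 1) 1).foldl
        (fun p i =>
          ((if PySem.List.pyGetD arr (i + 1) 0 < PySem.List.pyGetD arr i 0 then false else p.1),
           (if PySem.List.pyGetD arr i 0 < PySem.List.pyGetD arr (i + 1) 0 then false else p.2)))
        (true, true)).2) = true) := by
      rw [Bool.or_eq_true]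
      rintro (h | h)
      · exact hg (Or.inl ((pvB_guard arr).mp h))
      · exact hg (Or.inr ((pvB_guard2 arr).mp h))
    rw [if_neg hcond]
    obtain ⟨hAL, hAR⟩ := pvA_main arr hna
    obtain ⟨l, hleq, hlchar⟩ := pvB_loop3 arr hna
    obtain ⟨r, hreq, hrchar⟩ := pvB_loop2 arr hna
    rw [hleq, hreq, pvCharL_unique arr _ l hAL hlchar, pvCharR_unique arr _ r hAR hrchar]
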